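-- pv_equiv track=rewrite | github.com/di-unipi-socc/Cut-Shoot | run.py | calculate_shots
-- ===== SOURCE A (Python) =====
-- def calculate_shots(vcs_len, shots_assignment):
--     vcs_shots = []
--     assignment = shots_assignment[0]
--     if assignment == "exponential":
--         shots_coefficient = shots_assignment[1]["shots_coefficient"]
--         for fragment, qubits in vcs_len:
--             shots = shots_coefficient * 2 ** qubits
--             vcs_shots.append((fragment, shots))
--     elif assignment == "constant":
--         shots = shots_assignment[1]["shots"]
--         for fragment, qubits in vcs_len:
--             vcs_shots.append((fragment, shots))
--     elif assignment == "linear":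
--         shots_coefficient = shots_assignment[1]["shots_coefficient"]
--         for fragment, qubits in vcs_len:
--             shots = shots_coefficient * qubits
--             vcs_shots.append((fragment, shots))
--     elif assignment == "fragment_constant":
--         shots = shots_assignment[1]["shots"]
--         for fragment, _ in vcs_len:
--             vcs_shots.append((fragment, shots//len(vcs_len)))
--     elif assignment == "exponential_divided":
--         qubits = shots_assignment[1]["qubit"]
--         shots_coefficient = shots_assignment[1]["shots_coefficient"]
--         shots = shots_coefficient * 2 ** qubits
--         for fragment, _ in vcs_len:
--             vcs_shots.append((fragment, shots//len(vcs_len)))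
--     else:
--         raise Exception("Invalid shots assignment")
--     return vcs_shots
-- ===== SOURCE B (Python) =====
-- # Table-driven: each strategy is a row (coeff_key, exp_src, degree, divided) of one
-- # uniform formula  shots = coeff * 2**e * qubits**degree  (// len if divided).
-- _TABLE = {
--     "exponential":         ("shots_coefficient", "q",     0, False),
--     "constant":            ("shots",             None,    0, False),
--     "linear":              ("shots_coefficient", None,    1, False),
--     "fragment_constant":   ("shots",             None,    0, True),
--     "exponential_divided": ("shots_coefficient", "qubit", 0, True),
-- }
--
-- def calculate_shots(vcs_len, shots_assignment):
--     kind, params = shots_assignment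
--     if kind not in _TABLE:
--         raise Exception("Invalid shots assignment")
--     coeff_key, exp_src, degree, divided = _TABLE[kind]
--     coeff = params[coeff_key]
--     fixed_exp = params[exp_src] if exp_src not in (None, "q") else 0
--     out = []
--     for fragment, qubits in vcs_len:
--         shots = coeff * 2 ** (qubits if exp_src == "q" else fixed_exp) * qubits ** degree
--         if divided:
--             shots //= len(vcs_len)
--         out.append((fragment, shots))
--     return out
-- ===== Notes on version B (the rewrite author's own statement) =====
-- stated objective: simpler
-- what changed: B replaces A's five copy-pasted per-strategy loops by a data-driven strategy table whose rows (coeff_key, exp_src, degree, divided) parameterise one uniform formula coeff * 2**e * qubits**degree (floor-divided by len(vcs_len) when flagged) applied in a single loop.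
import Mathlib
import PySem

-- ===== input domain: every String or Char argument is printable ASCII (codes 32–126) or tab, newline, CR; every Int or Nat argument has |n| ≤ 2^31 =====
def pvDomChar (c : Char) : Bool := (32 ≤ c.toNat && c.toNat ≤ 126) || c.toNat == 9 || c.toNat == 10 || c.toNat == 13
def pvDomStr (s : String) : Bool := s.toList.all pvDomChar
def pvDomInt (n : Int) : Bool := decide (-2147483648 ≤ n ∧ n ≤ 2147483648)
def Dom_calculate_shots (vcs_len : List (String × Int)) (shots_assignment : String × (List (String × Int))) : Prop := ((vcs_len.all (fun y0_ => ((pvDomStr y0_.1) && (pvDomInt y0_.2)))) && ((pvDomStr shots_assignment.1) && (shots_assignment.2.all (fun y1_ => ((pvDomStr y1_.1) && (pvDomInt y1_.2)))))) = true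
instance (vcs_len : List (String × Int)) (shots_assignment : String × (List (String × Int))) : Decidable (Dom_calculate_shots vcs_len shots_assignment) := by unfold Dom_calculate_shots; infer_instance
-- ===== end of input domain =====

-- B replaces A's five copy-pasted per-strategy loops by one strategy TABLE whose rows
-- parameterise a single uniform formula  coeff * 2**e * qubits**degree (// len if divided)
-- applied in one loop (objective: simpler/alternative; return value only, no mutation).

-- Exact Int model of Python's '2 ** e' where Pre_ admits it (0 ≤ e); for e < 0 Python
-- yields a float, those inputs are excluded by Pre_ and the value here is arbitrary.
def pyPow2 (e : Int) : Int := if 0 ≤ e then 2 ^ e.toNat else 0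

-- ===== PORT A =====
def calculate_shots (vcs_len : List (String × Int)) (shots_assignment : String × (List (String × Int))) : List (String × Int) :=
  let d := PySem.Dict.ofList shots_assignment.2
  if shots_assignment.1 = "exponential" then
    let c := d.getD "shots_coefficient" 0
    vcs_len.foldl (fun acc p => acc ++ [(p.1, c * pyPow2 p.2)]) []
  else if shots_assignment.1 = "constant" then
    let s := d.getD "shots" 0
    vcs_len.foldl (fun acc p => acc ++ [(p.1, s)]) []
  else if shots_assignment.1 = "linear" then
    let c := d.getD "shots_coefficient" 0
    vcs_len.foldl (fun acc p => acc ++ [(p.1, c * p.2)]) []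
  else if shots_assignment.1 = "fragment_constant" then
    let s := d.getD "shots" 0
    vcs_len.foldl (fun acc p => acc ++ [(p.1, PySem.Int.floordiv s vcs_len.length)]) []
  else if shots_assignment.1 = "exponential_divided" then
    let q := d.getD "qubit" 0
    let c := d.getD "shots_coefficient" 0
    let s := c * pyPow2 q
    vcs_len.foldl (fun acc p => acc ++ [(p.1, PySem.Int.floordiv s vcs_len.length)]) []
  else []   -- Python raises Exception("Invalid shots assignment"); excluded by Pre_

-- ===== PORT B =====
-- the strategy table _TABLE: kind ↦ (coeff_key, exp_src, degree, divided)
def pvTable : PySem.Dict String (String × Option String × Int × Bool) :=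
  PySem.Dict.ofList [
    ("exponential",         ("shots_coefficient", some "q",     0, false)),
    ("constant",            ("shots",             none,         0, false)),
    ("linear",              ("shots_coefficient", none,         1, false)),
    ("fragment_constant",   ("shots",             none,         0, true)),
    ("exponential_divided", ("shots_coefficient", some "qubit", 0, true))]

def calculate_shots_alt (vcs_len : List (String × Int)) (shots_assignment : String × (List (String × Int))) : List (String × Int) :=
  match pvTable.get? shots_assignment.1 with
  | none => []   -- Python raises Exception("Invalid shots assignment"); excluded by Pre_
  | some (coeff_key, exp_src, degree, divided) =>
    let params := PySem.Dict.ofList shots_assignment.2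
    let coeff := params.getD coeff_key 0
    let fixed_exp := match exp_src with
      | none => 0
      | some k => if k = "q" then 0 else params.getD k 0
    vcs_len.foldl (fun out p =>
      let shots := coeff * pyPow2 (if exp_src = some "q" then p.2 else fixed_exp) * p.2 ^ degree.toNat
      let shots := if divided then PySem.Int.floordiv shots vcs_len.length else shots
      out ++ [(p.1, shots)]) []

-- ===== PRECONDITION & SPEC =====
-- Pre_ excludes inputs on which A raises (an unknown strategy name → Exception, a
-- missing required parameter key → KeyError) and inputs where an exponential strategy
-- meets a negative exponent: there Python's 2**e is a float, so A's result is not a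
-- value of the declared int type.
def Pre_calculate_shots (vcs_len : List (String × Int)) (shots_assignment : String × (List (String × Int))) : Prop :=
  let d := PySem.Dict.ofList shots_assignment.2
  (shots_assignment.1 = "exponential" ∧ d.contains "shots_coefficient" = true ∧ ∀ p ∈ vcs_len, 0 ≤ p.2)
  ∨ (shots_assignment.1 = "constant" ∧ d.contains "shots" = true)
  ∨ (shots_assignment.1 = "linear" ∧ d.contains "shots_coefficient" = true)
  ∨ (shots_assignment.1 = "fragment_constant" ∧ d.contains "shots" = true)
  ∨ (shots_assignment.1 = "exponential_divided" ∧ d.contains "qubit" = true ∧ d.contains "shots_coefficient" = true ∧ 0 ≤ d.getD "qubit" 0)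
instance (vcs_len : List (String × Int)) (shots_assignment : String × (List (String × Int))) : Decidable (Pre_calculate_shots vcs_len shots_assignment) := by unfold Pre_calculate_shots; infer_instance

def pvWitness_calculate_shots : (List (String × Int)) × (String × (List (String × Int))) :=
  ([("f", 2), ("g", 3)], ("exponential", [("shots_coefficient", 5)]))

def Spec_calculate_shots (vcs_len : List (String × Int)) (shots_assignment : String × (List (String × Int))) (out : List (String × Int)) : Prop := out = calculate_shots_alt vcs_len shots_assignment
instance (vcs_len : List (String × Int)) (shots_assignment : String × (List (String × Int))) (out : List (String × Int)) : Decidable (Spec_calculate_shots vcs_len shots_assignment out) := by unfold Spec_calculate_shots; infer_instance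

-- ===== CLAIM (what is proved, stated in full; the proofs are below) =====
def Claim_equal_calculate_shots : Prop := ∀ (vcs_len : List (String × Int)) (shots_assignment : String × (List (String × Int))), Dom_calculate_shots vcs_len shots_assignment → Pre_calculate_shots vcs_len shots_assignment → Spec_calculate_shots vcs_len shots_assignment (calculate_shots vcs_len shots_assignment)

-- ===== LEMMAS AND PROOFS =====
theorem pvTable_exponential : pvTable.get? "exponential" = some ("shots_coefficient", some "q", 0, false) := by decide
theorem pvTable_constant : pvTable.get? "constant" = some ("shots", none, 0, false) := by decide
theorem pvTable_linear : pvTable.get? "linear" = some ("shots_coefficient", none, 1, false) := by decide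
theorem pvTable_fragment_constant : pvTable.get? "fragment_constant" = some ("shots", none, 0, true) := by decide
theorem pvTable_exponential_divided : pvTable.get? "exponential_divided" = some ("shots_coefficient", some "qubit", 0, true) := by decide

theorem calculate_shots_eq (vcs_len : List (String × Int)) (kind : String) (params : List (String × Int))
    (hpre : Pre_calculate_shots vcs_len (kind, params)) :
    calculate_shots vcs_len (kind, params) = calculate_shots_alt vcs_len (kind, params) := by
  unfold Pre_calculate_shots at hpre
  rcases hpre with ⟨h, -⟩ | ⟨h, -⟩ | ⟨h, -⟩ | ⟨h, -⟩ | ⟨h, -⟩ <;> subst h <;>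
    simp [calculate_shots, calculate_shots_alt, pvTable_exponential, pvTable_constant,
          pvTable_linear, pvTable_fragment_constant, pvTable_exponential_divided, pyPow2, mul_comm]

-- ===== VERDICT (by name: the statement is the Claim_ definition above) =====
theorem calculate_shots_spec : Claim_equal_calculate_shots := by
  intro vcs_len sa _hdom hpre
  unfold Spec_calculate_shots
  obtain ⟨kind, params⟩ := sa
  exact (calculate_shots_eq vcs_len kind params hpre).symm ▸ rfl
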